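-- pv_equiv track=rewrite | github.com/hoshisabi/miscprojects | ancient_nations/world.py | _get_radius_offsets
-- ===== SOURCE A (Python) =====
-- _RADIUS_OFFSETS: dict = {}
--
-- def _get_radius_offsets(r: int) -> list:
--     if r not in _RADIUS_OFFSETS:
--         r2 = r * r
--         _RADIUS_OFFSETS[r] = [
--             (dx, dy)
--             for dy in range(-r, r + 1)
--             for dx in range(-r, r + 1)
--             if dx * dx + dy * dy <= r2
--         ]
--     return _RADIUS_OFFSETS[r]
-- ===== SOURCE B (Python) =====
-- _RADIUS_OFFSETS: dict = {}
--
--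
-- def _get_radius_offsets(r: int) -> list:
--     # Row half-widths found with a monotone descending pointer instead of
--     # testing every (dx, dy) candidate; same order and memo dict as before.
--     if r not in _RADIUS_OFFSETS:
--         r2 = r * r
--         half = []            # half[dy] = max m with m*m + dy*dy <= r2, for dy = 0..r
--         m = r
--         for dy in range(0, r + 1):
--             while m * m + dy * dy > r2:
--                 m -= 1
--             half.append(m)
--         widths = half[::-1] + half[1:]   # half-widths for dy = -r..r (symmetry)
--         out = []
--         for dy, m in zip(range(-r, r + 1), widths):
--             out.extend((dx, dy) for dx in range(-m, m + 1))
--         _RADIUS_OFFSETS[r] = out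
--     return _RADIUS_OFFSETS[r]
-- ===== Notes on version B (the rewrite author's own statement) =====
-- stated objective: alternative
-- what changed: Replaces the test-every-candidate double loop (all (2r+1)^2 points filtered by dx*dx+dy*dy<=r*r) with a monotone descending two-pointer that computes each row's exact half-width once and emits rows directly via symmetry.
import Mathlib
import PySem

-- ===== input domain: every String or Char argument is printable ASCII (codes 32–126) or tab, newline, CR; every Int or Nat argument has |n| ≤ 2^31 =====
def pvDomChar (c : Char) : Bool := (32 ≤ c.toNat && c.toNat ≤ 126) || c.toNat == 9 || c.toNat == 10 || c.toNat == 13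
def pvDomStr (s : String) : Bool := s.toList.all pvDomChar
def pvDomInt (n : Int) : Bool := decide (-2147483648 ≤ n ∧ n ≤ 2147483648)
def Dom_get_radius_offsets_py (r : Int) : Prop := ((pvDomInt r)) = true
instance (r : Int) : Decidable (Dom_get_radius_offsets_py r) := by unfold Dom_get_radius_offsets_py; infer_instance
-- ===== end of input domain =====

-- B replaces A's test-every-candidate square scan by a descending two-pointer computing each
-- row's half-width once (alternative algorithm, same output order). Both Pythons memoize in a
-- module-level dict; the equivalence proved here is about the RETURN value only.

-- ===== PORT A =====
-- [(dx, dy) for dy in range(-r, r+1) for dx in range(-r, r+1) if dx*dx + dy*dy <= r*r]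
def get_radius_offsets_py (r : Int) : List (Int × Int) :=
  (PySem.List.pyRange (-r) (r + 1) 1).flatMap (fun dy =>
    (PySem.List.pyRange (-r) (r + 1) 1).flatMap (fun dx =>
      if dx * dx + dy * dy ≤ r * r then [(dx, dy)] else []))

-- ===== PORT B =====
-- the inner `while m*m + dy*dy > r2: m -= 1`; fuel m.toNat+1 only makes the recursion total,
-- it never runs out on the calls B makes (the pointer stops at or before 0 there)
def pvShrink (r2 dy2 : Int) : Nat → Int → Int
  | 0, m => m
  | fuel + 1, m => if r2 < m * m + dy2 then pvShrink r2 dy2 fuel (m - 1) else m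

def get_radius_offsets_py_alt (r : Int) : List (Int × Int) :=
  let r2 := r * r
  let half := ((PySem.List.pyRange 0 (r + 1) 1).foldl
      (fun (st : Int × List Int) dy =>
        let m := pvShrink r2 (dy * dy) (st.1.toNat + 1) st.1
        (m, st.2 ++ [m])) (r, [])).2
  let widths := half.reverse ++ half.drop 1
  ((PySem.List.pyRange (-r) (r + 1) 1).zip widths).flatMap (fun p =>
    (PySem.List.pyRange (-p.2) (p.2 + 1) 1).map (fun dx => (dx, p.1)))

-- ===== PRECONDITION & SPEC =====
def Spec_get_radius_offsets_py (r : Int) (out : List (Int × Int)) : Prop := out = get_radius_offsets_py_alt r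
instance (r : Int) (out : List (Int × Int)) : Decidable (Spec_get_radius_offsets_py r out) := by unfold Spec_get_radius_offsets_py; infer_instance

-- ===== CLAIM (what is proved, stated in full; the proofs are below) =====
def Claim_equal_get_radius_offsets_py : Prop := ∀ (r : Int), Dom_get_radius_offsets_py r → Spec_get_radius_offsets_py r (get_radius_offsets_py r)

-- ===== LEMMAS AND PROOFS =====

-- abbreviation used only in proofs: the exact half-width of row dy
def pvHW (r dy : Int) : Int := Int.sqrt (r * r - dy * dy)

lemma pvHW_sq_le (r dy : Int) (h : dy * dy ≤ r * r) :
    pvHW r dy * pvHW r dy + dy * dy ≤ r * r := by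
  unfold pvHW Int.sqrt
  have hk : (0:Int) ≤ r * r - dy * dy := by linarith
  have h1 := Nat.sqrt_le' (r * r - dy * dy).toNat
  rw [pow_two] at h1
  have h2 : ((Nat.sqrt (r * r - dy * dy).toNat : Int)) * (Nat.sqrt (r * r - dy * dy).toNat : Int)
      ≤ ((r * r - dy * dy).toNat : Int) := by exact_mod_cast h1
  rw [Int.toNat_of_nonneg hk] at h2
  linarith

lemma pvHW_lt_succ (r dy : Int) :
    r * r < (pvHW r dy + 1) * (pvHW r dy + 1) + dy * dy := by
  unfold pvHW Int.sqrt
  have h1 := Nat.lt_succ_sqrt' (r * r - dy * dy).toNat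
  rw [Nat.succ_eq_add_one, pow_two] at h1
  have h2 : ((r * r - dy * dy).toNat : Int)
      < ((Nat.sqrt (r * r - dy * dy).toNat : Int) + 1) * ((Nat.sqrt (r * r - dy * dy).toNat : Int) + 1) := by
    exact_mod_cast h1
  have h3 : r * r - dy * dy ≤ ((r * r - dy * dy).toNat : Int) := Int.self_le_toNat _
  linarith

lemma pvHW_nonneg (r dy : Int) : 0 ≤ pvHW r dy := Int.sqrt_nonneg _

lemma pvHW_le_r (r dy : Int) (hr : 0 ≤ r) : pvHW r dy ≤ r := by
  have h1 : pvHW r dy * pvHW r dy ≤ r * r := by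
    unfold pvHW Int.sqrt
    have h1 := Nat.sqrt_le' (r * r - dy * dy).toNat
    rw [pow_two] at h1
    have h2 : ((Nat.sqrt (r * r - dy * dy).toNat : Int)) * (Nat.sqrt (r * r - dy * dy).toNat : Int)
        ≤ ((r * r - dy * dy).toNat : Int) := by exact_mod_cast h1
    have h3 : ((r * r - dy * dy).toNat : Int) ≤ r * r := by
      have hrr : (0:Int) ≤ r * r := mul_self_nonneg r
      have hdd : (0:Int) ≤ dy * dy := mul_self_nonneg dy
      omega
    linarith
  nlinarith [pvHW_nonneg r dy]

lemma pvHW_anti (r a b : Int) (h0 : 0 ≤ a) (hab : a ≤ b) : pvHW r b ≤ pvHW r a := by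
  unfold pvHW Int.sqrt
  have : (r * r - b * b).toNat ≤ (r * r - a * a).toNat := by
    have : r * r - b * b ≤ r * r - a * a := by nlinarith
    omega
  exact_mod_cast Nat.sqrt_le_sqrt this

lemma pvHW_neg (r dy : Int) : pvHW r (-dy) = pvHW r dy := by simp [pvHW]

lemma pvSq_iff (r dy x : Int) (h : dy * dy ≤ r * r) :
    (x * x + dy * dy ≤ r * r) ↔ (-(pvHW r dy) ≤ x ∧ x ≤ pvHW r dy) := by
  constructor
  · intro hx
    have hlt := pvHW_lt_succ r dy
    have h0 := pvHW_nonneg r dy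
    constructor
    · by_contra hc; push Not at hc; nlinarith
    · by_contra hc; push Not at hc; nlinarith
  · rintro ⟨h1, h2⟩
    have := pvHW_sq_le r dy h
    nlinarith

lemma pvFilter_interval (lo hi : Int) :
    ∀ (n : Nat) (a b : Int), (b - a).toNat = n →
      (PySem.List.pyRange a b 1).filter (fun x => decide (lo ≤ x ∧ x ≤ hi))
        = PySem.List.pyRange (max a lo) (min b (hi + 1)) 1 := by
  intro n
  induction n with
  | zero =>
    intro a b hab
    have hba : b ≤ a := by omega
    rw [PySem.List.pyRange_one_eq_nil hba,
      PySem.List.pyRange_one_eq_nil (by omega : min b (hi+1) ≤ max a lo)]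
    rfl
  | succ n ih =>
    intro a b hab
    have hlt : a < b := by omega
    rw [PySem.List.pyRange_one_cons hlt, List.filter_cons]
    by_cases h1 : lo ≤ a ∧ a ≤ hi
    · have hmax : max a lo = a := by omega
      have hmax2 : max (a+1) lo = a + 1 := by omega
      rw [if_pos (by simpa using h1), ih (a+1) b (by omega), hmax2, hmax,
        PySem.List.pyRange_one_cons (by omega : a < min b (hi+1))]
    · rw [if_neg (by simpa using h1), ih (a+1) b (by omega)]
      rcases not_and_or.mp h1 with h2 | h2
      · have e1 : max (a+1) lo = max a lo := by omega
        rw [e1]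
      · rw [PySem.List.pyRange_one_eq_nil (by omega : min b (hi+1) ≤ max (a+1) lo),
          PySem.List.pyRange_one_eq_nil (by omega : min b (hi+1) ≤ max a lo)]

lemma pvFlatMap_if {α β : Type} (p : α → Prop) [DecidablePred p] (f : α → β) (l : List α) :
    l.flatMap (fun x => if p x then [f x] else []) = (l.filter (fun x => decide (p x))).map f := by
  induction l with
  | nil => rfl
  | cons a t ih => by_cases h : p a <;> simp [List.flatMap_cons, ih, h]

lemma pvShrink_eq (r2 dy2 s : Int)
    (hs0 : 0 ≤ s) (hle : s * s + dy2 ≤ r2) (hlt : r2 < (s + 1) * (s + 1) + dy2) :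
    ∀ (fuel : Nat) (m : Int), s ≤ m → (m - s).toNat < fuel →
      pvShrink r2 dy2 fuel m = s := by
  intro fuel
  induction fuel with
  | zero => intro m _ h; omega
  | succ fuel ih =>
    intro m hsm hfu
    unfold pvShrink
    by_cases hc : r2 < m * m + dy2
    · have hne : m ≠ s := by rintro rfl; omega
      rw [if_pos hc]
      exact ih (m - 1) (by omega) (by omega)
    · rw [if_neg hc]
      push Not at hc
      by_contra hne
      have hms : s + 1 ≤ m := by omega
      nlinarith

lemma pvHalf_eq (r : Int) (hr : 0 ≤ r) :
    ∀ (n : Nat) (j m0 : Int) (acc : List Int), (r + 1 - j).toNat = n →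
      0 ≤ j → pvHW r j ≤ m0 →
      ((PySem.List.pyRange j (r + 1) 1).foldl
        (fun (st : Int × List Int) dy =>
          (pvShrink (r * r) (dy * dy) (st.1.toNat + 1) st.1,
           st.2 ++ [pvShrink (r * r) (dy * dy) (st.1.toNat + 1) st.1])) (m0, acc)).2
      = acc ++ (PySem.List.pyRange j (r + 1) 1).map (pvHW r) := by
  intro n
  induction n with
  | zero =>
    intro j m0 acc hn _ _
    rw [PySem.List.pyRange_one_eq_nil (by omega : r + 1 ≤ j)]
    simp
  | succ n ih =>
    intro j m0 acc hn hj hm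
    have hlt : j < r + 1 := by omega
    rw [PySem.List.pyRange_one_cons hlt, List.foldl_cons, List.map_cons]
    have hjj : j * j ≤ r * r := by nlinarith
    have hstep : pvShrink (r * r) (j * j) (m0.toNat + 1) m0 = pvHW r j := by
      apply pvShrink_eq _ _ _ (pvHW_nonneg r j) (pvHW_sq_le r j hjj) (pvHW_lt_succ r j)
        _ _ hm
      have := pvHW_nonneg r j
      omega
    rw [hstep, ih (j + 1) (pvHW r j) (acc ++ [pvHW r j]) (by omega) (by omega)
      (pvHW_anti r j (j + 1) hj (by omega)), List.append_assoc]
    rfl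

lemma pvWidths_eq (r : Int) (hr : 0 ≤ r) :
    ((PySem.List.pyRange 0 (r + 1) 1).map (pvHW r)).reverse
      ++ ((PySem.List.pyRange 0 (r + 1) 1).map (pvHW r)).drop 1
    = (PySem.List.pyRange (-r) (r + 1) 1).map (pvHW r) := by
  have hn : (PySem.List.pyRange 0 (r + 1) 1).length = (r + 1).toNat := by
    rw [PySem.List.length_pyRange_one]; omega
  rw [PySem.List.pyRange_one_append (-r) 1 (r + 1) (by omega) (by omega), List.map_append]
  congr 1
  · rw [← List.map_reverse]
    apply List.ext_getElem
    · simp only [List.length_map, List.length_reverse, PySem.List.length_pyRange_one]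
      omega
    · intro i h1 h2
      simp only [List.getElem_map, List.getElem_reverse]
      rw [PySem.List.getElem_pyRange_one, PySem.List.getElem_pyRange_one]
      rw [← pvHW_neg r (-r + ↑i)]
      congr 1
      simp only [List.length_map, PySem.List.length_pyRange_one] at h1 h2
      rw [hn]
      omega
  · have h01 : (0:Int) + 1 = 1 := by norm_num
    rw [PySem.List.pyRange_one_cons (by omega : (0:Int) < r + 1), h01, List.map_cons,
      List.drop_one, List.tail_cons]

lemma pvRow_eq (r dy : Int) (hr : 0 ≤ r) (h1 : -r ≤ dy) (h2 : dy ≤ r) :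
    (PySem.List.pyRange (-r) (r + 1) 1).flatMap (fun dx =>
      if dx * dx + dy * dy ≤ r * r then [(dx, dy)] else [])
    = (PySem.List.pyRange (-(pvHW r dy)) (pvHW r dy + 1) 1).map (fun dx => (dx, dy)) := by
  have hdd : dy * dy ≤ r * r := by nlinarith
  rw [pvFlatMap_if (fun dx => dx * dx + dy * dy ≤ r * r) (fun dx => (dx, dy))]
  have hpred : (fun x => decide (x * x + dy * dy ≤ r * r))
      = fun x => decide (-(pvHW r dy) ≤ x ∧ x ≤ pvHW r dy) := by
    funext x
    rw [decide_eq_decide]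
    exact pvSq_iff r dy x hdd
  rw [hpred, pvFilter_interval (-(pvHW r dy)) (pvHW r dy) (r + 1 - (-r)).toNat (-r) (r+1) rfl]
  have hle := pvHW_le_r r dy hr
  have h0 := pvHW_nonneg r dy
  have e1 : max (-r) (-(pvHW r dy)) = -(pvHW r dy) := by omega
  have e2 : min (r + 1) (pvHW r dy + 1) = pvHW r dy + 1 := by omega
  rw [e1, e2]

lemma pvFlatMap_congr {α β : Type} (l : List α) (f g : α → List β)
    (h : ∀ x ∈ l, f x = g x) : l.flatMap f = l.flatMap g := by
  induction l with
  | nil => rfl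
  | cons a t ih =>
    simp only [List.flatMap_cons, h a (by simp)]
    rw [ih (fun x hx => h x (by simp [hx]))]

lemma pvZip_self_map {α β : Type} (l : List α) (g : α → β) :
    l.zip (l.map g) = l.map (fun a => (a, g a)) := by
  induction l with
  | nil => rfl
  | cons a t ih => simp [ih]

-- ===== VERDICT (by name: the statement is the Claim_ definition above) =====
theorem get_radius_offsets_py_spec : Claim_equal_get_radius_offsets_py := by
  intro r _
  unfold Spec_get_radius_offsets_py get_radius_offsets_py get_radius_offsets_py_alt
  by_cases hr : 0 ≤ r
  · simp only []
    rw [pvHalf_eq r hr (r + 1).toNat 0 r [] (by omega) le_rfl (pvHW_le_r r 0 hr)]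
    rw [List.nil_append, pvWidths_eq r hr, pvZip_self_map]
    rw [List.flatMap_map]
    apply pvFlatMap_congr
    intro dy hdy
    rw [PySem.List.mem_pyRange_one] at hdy
    exact pvRow_eq r dy hr (by omega) (by omega)
  · rw [PySem.List.pyRange_one_eq_nil (by omega : r + 1 ≤ -r),
      PySem.List.pyRange_one_eq_nil (by omega : r + 1 ≤ 0)]
    simp
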